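-- pv_equiv track=rewrite | github.com/GaboEsperon/AyED1-2025-TPs | TP4/Actvidad_11.py | contar_subcadena
-- ===== SOURCE A (Python) =====
-- def contar_subcadena(cadena: str, subcadena: str) -> int:
--     """
--     Cuenta cuántas veces se encuentra una subcadena dentro de otra cadena,
--     sin diferenciar mayúsculas y sin requerir que los caracteres sean consecutivos,
--     pero sí en el mismo orden.
--
--     Parámetros:
--         cadena (str): texto donde se busca.
--         subcadena (str): patrón a buscar.
--
--     Retorna:
--         int: cantidad de veces que la subcadena aparece como subsecuencia.
--
--     """
--     if not subcadena:
--         return 0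
--
--     cadena = cadena.lower()
--     subcadena = subcadena.lower()
--
--     count = 0
--     start = 0
--
--     while start < len(cadena):
--         temp = subcadena
--         for i in range(start, len(cadena)):
--             if cadena[i] == temp[0]:
--                 temp = temp[1:]
--                 if not temp:
--                     count += 1
--                     start = i + 1
--                     break
--         else:
--             break
--     return count
-- ===== SOURCE B (Python) =====
-- def contar_subcadena(cadena: str, subcadena: str) -> int:
--     """Single pass with an integer pointer into the pattern instead of
--     repeated string slicing and restarted scans."""
--     if not subcadena:
--         return 0
--     sub = subcadena.lower()
--     m = len(sub)
--     count = 0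
--     j = 0
--     for ch in cadena.lower():
--         if ch == sub[j]:
--             j += 1
--             if j == m:
--                 count += 1
--                 j = 0
--     return count
-- ===== Notes on version B (the rewrite author's own statement) =====
-- stated objective: faster
-- what changed: Replaced the restarted inner scan with repeated string slicing (temp = temp[1:]) by a single pass over the text with an integer pointer into the lowered pattern, resetting the pointer on each completion.
import Mathlib
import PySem

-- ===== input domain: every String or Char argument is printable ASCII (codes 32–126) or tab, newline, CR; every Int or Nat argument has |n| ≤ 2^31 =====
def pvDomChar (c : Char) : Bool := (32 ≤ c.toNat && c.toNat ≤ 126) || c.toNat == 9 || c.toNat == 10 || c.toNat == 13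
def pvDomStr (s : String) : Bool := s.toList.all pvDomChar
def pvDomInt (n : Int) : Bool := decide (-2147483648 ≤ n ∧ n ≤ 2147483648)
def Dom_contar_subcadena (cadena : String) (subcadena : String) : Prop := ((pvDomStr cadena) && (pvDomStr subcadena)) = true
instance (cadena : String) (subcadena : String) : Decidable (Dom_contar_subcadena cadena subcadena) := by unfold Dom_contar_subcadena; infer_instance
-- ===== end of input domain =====

-- B replaces A's restarted inner scan with repeated slicing by a single pass holding an
-- integer pointer into the pattern (objective: faster, asymptotic O(n+m) vs O(n*m)).

-- ===== PORT A =====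
-- inner 'for i in range(start, len(cadena))' loop: scans the remaining text against temp;
-- returns the text after the completion point ('break' with start = i+1), none = the
-- for-loop's 'else' (scan exhausted without completing temp)
def pvInnerA : List Char → List Char → Option (List Char)
  | _, [] => none
  | [], _ :: _ => none         -- unreachable: temp is never empty when consulted (temp[0])
  | t :: ts, c :: cs =>
    if c = t then
      (if ts = [] then some cs else pvInnerA ts cs)
    else pvInnerA (t :: ts) cs

-- termination measure for the outer while loop: each completed match consumes ≥ 1 char
theorem pvInnerA_length : ∀ (temp rest rest' : List Char),
    pvInnerA temp rest = some rest' → rest'.length < rest.length := by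
  intro temp rest
  induction rest generalizing temp with
  | nil => intro r h; cases temp <;> simp [pvInnerA] at h
  | cons c cs ih =>
    intro r h
    cases temp with
    | nil => simp [pvInnerA] at h
    | cons t ts =>
      simp only [pvInnerA] at h
      split_ifs at h with h1 h2
      · cases h; simp
      · exact Nat.lt_trans (ih ts r h) (by simp)
      · exact Nat.lt_trans (ih (t :: ts) r h) (by simp)

-- outer 'while start < len(cadena)' loop
def pvOuterA (sub : List Char) (rest : List Char) : Int :=
  match h : pvInnerA sub rest with
  | some rest' => 1 + pvOuterA sub rest'
  | none => 0
termination_by rest.length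
decreasing_by exact pvInnerA_length _ _ _ h

def contar_subcadena (cadena : String) (subcadena : String) : Int :=
  if subcadena.toList = [] then 0
  else pvOuterA (PySem.Chars.lower subcadena.toList) (PySem.Chars.lower cadena.toList)

-- ===== PORT B =====
-- single pass over the lowered text; j is the pointer into the lowered pattern
def pvLoopB (sub : List Char) (count : Int) (j : Nat) : List Char → Int
  | [] => count
  | c :: cs =>
    if c = sub.getD j ' ' then
      if j + 1 = sub.length then pvLoopB sub (count + 1) 0 cs
      else pvLoopB sub count (j + 1) cs
    else pvLoopB sub count j cs

def contar_subcadena_alt (cadena : String) (subcadena : String) : Int :=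
  if subcadena.toList = [] then 0
  else pvLoopB (PySem.Chars.lower subcadena.toList) 0 0 (PySem.Chars.lower cadena.toList)

-- ===== PRECONDITION & SPEC =====
def Spec_contar_subcadena (cadena : String) (subcadena : String) (out : Int) : Prop := out = contar_subcadena_alt cadena subcadena
instance (cadena : String) (subcadena : String) (out : Int) : Decidable (Spec_contar_subcadena cadena subcadena out) := by unfold Spec_contar_subcadena; infer_instance

-- ===== CLAIM (what is proved, stated in full; the proofs are below) =====
def Claim_equal_contar_subcadena : Prop := ∀ (cadena : String) (subcadena : String), Dom_contar_subcadena cadena subcadena → Spec_contar_subcadena cadena subcadena (contar_subcadena cadena subcadena)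

-- ===== LEMMAS AND PROOFS =====

-- the value the outer loop contributes once the inner scan's outcome is known
def pvAux (sub temp rest : List Char) : Int :=
  match pvInnerA temp rest with
  | some rest' => 1 + pvOuterA sub rest'
  | none => 0

theorem pvOuterA_eq_aux (sub rest : List Char) : pvOuterA sub rest = pvAux sub sub rest := by
  rw [pvOuterA]
  cases hI : pvInnerA sub rest <;> simp [pvAux, hI]

-- loop invariant: B's pass with pointer j computes count + A's remaining contribution,
-- where the still-unmatched part of the pattern is sub.drop j
theorem pvLoopB_eq (sub : List Char) :
    ∀ (rest : List Char) (j : Nat) (count : Int), j < sub.length →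
      pvLoopB sub count j rest = count + pvAux sub (sub.drop j) rest := by
  intro rest
  induction rest with
  | nil =>
    intro j count hj
    have : pvInnerA (sub.drop j) [] = none := by
      cases sub.drop j <;> simp [pvInnerA]
    simp [pvLoopB, pvAux, this]
  | cons c cs ih =>
    intro j count hj
    have hdrop : sub.drop j = sub[j] :: sub.drop (j + 1) := List.drop_eq_getElem_cons hj
    have hgd : sub.getD j ' ' = sub[j] := List.getD_eq_getElem sub ' ' hj
    by_cases hc : c = sub[j]
    · by_cases hend : j + 1 = sub.length
      · have hts : sub.drop (j + 1) = [] := by simp [hend]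
        have h0 : 0 < sub.length := by omega
        simp only [pvLoopB, hgd]
        rw [if_pos hc, if_pos hend, ih 0 (count + 1) h0]
        simp only [pvAux]
        rw [hdrop, hts]
        simp only [pvInnerA, hc, reduceIte]
        rw [List.drop_zero, pvOuterA_eq_aux]
        simp only [pvAux]
        ring
      · have hj1 : j + 1 < sub.length := by omega
        have hts : sub.drop (j + 1) ≠ [] := by
          simp [List.drop_eq_nil_iff]; omega
        simp only [pvLoopB, hgd]
        rw [if_pos hc, if_neg hend, ih (j + 1) count hj1]
        simp only [pvAux]
        rw [hdrop]
        simp only [pvInnerA, hc, reduceIte]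
        rw [if_neg hts]
    · simp only [pvLoopB, hgd]
      rw [if_neg hc, ih j count hj]
      simp only [pvAux]
      rw [hdrop]
      simp only [pvInnerA]
      rw [if_neg hc]


-- ===== VERDICT (by name: the statement is the Claim_ definition above) =====
theorem contar_subcadena_spec : Claim_equal_contar_subcadena := by
  intro cadena subcadena _
  unfold Spec_contar_subcadena contar_subcadena contar_subcadena_alt
  by_cases h : subcadena.toList = []
  · simp [h]
  · simp only [if_neg h]
    have hs : PySem.Chars.lower subcadena.toList ≠ [] := by
      intro hnil
      exact h (by simpa [PySem.Chars.lower, List.map_eq_nil_iff] using congrArg List.length hnil)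
    have hj : 0 < (PySem.Chars.lower subcadena.toList).length :=
      List.length_pos_of_ne_nil hs
    rw [pvLoopB_eq _ _ 0 0 hj]
    simp [pvOuterA_eq_aux]
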